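-- pv_equiv track=rewrite | github.com/oldo1013/RedRoverSchool | Codewars3.py | yoga
-- ===== SOURCE A (Python) =====
-- def yoga(classroom, poses):
--     amount = 0
--     if len(classroom) == 0 or len(poses) == 0:
--         return 0
--     for row in classroom:
--         summa = sum(row)
--         for pose in poses:
--             for per in row:
--                 if (per + summa) >= pose:
--                     amount += 1
--     return amount
-- ===== SOURCE B (Python) =====
-- def yoga(classroom, poses):
--     # faster: sort each row once, then binary-search the threshold pose - sum(row)
--     amount = 0
--     for row in classroom:
--         s = sum(row)
--         srow = sorted(row)
--         n = len(srow)
--         for pose in poses: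
--             t = pose - s
--             lo, hi = 0, n
--             while lo < hi:
--                 mid = (lo + hi) // 2
--                 if srow[mid] < t:
--                     lo = mid + 1
--                 else:
--                     hi = mid
--             amount += n - lo
--     return amount
-- ===== Notes on version B (the rewrite author's own statement) =====
-- stated objective: faster
-- what changed: Replaces the inner scan of the row per pose by sorting each row once and counting qualifying elements with a hand-written binary search on the threshold pose - sum(row).
import Mathlib
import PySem

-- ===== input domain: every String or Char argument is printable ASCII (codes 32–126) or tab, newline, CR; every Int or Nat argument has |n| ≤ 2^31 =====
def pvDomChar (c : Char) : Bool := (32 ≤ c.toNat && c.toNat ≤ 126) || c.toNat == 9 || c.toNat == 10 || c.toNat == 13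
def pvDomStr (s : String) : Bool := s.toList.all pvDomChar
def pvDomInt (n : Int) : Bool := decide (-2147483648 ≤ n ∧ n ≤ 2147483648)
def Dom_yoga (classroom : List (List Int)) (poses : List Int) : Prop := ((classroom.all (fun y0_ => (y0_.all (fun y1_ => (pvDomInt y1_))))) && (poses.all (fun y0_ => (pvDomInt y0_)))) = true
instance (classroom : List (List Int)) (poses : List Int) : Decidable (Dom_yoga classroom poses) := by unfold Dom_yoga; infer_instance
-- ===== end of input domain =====

-- ===== PORT A =====
-- B sorts each row once and binary-searches the threshold, instead of scanning the row per pose (faster).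
def yoga (classroom : List (List Int)) (poses : List Int) : Int :=
  if classroom.length = 0 ∨ poses.length = 0 then 0
  else
    classroom.foldl (fun amount row =>
      let summa := row.sum
      poses.foldl (fun amount pose =>
        row.foldl (fun amount per =>
          if per + summa ≥ pose then amount + 1 else amount) amount) amount) 0

-- ===== PORT B =====
-- the while loop 'lo, hi = 0, n; while lo < hi: ...' of Source B, structurally recursive on the
-- fuel hi - lo (an upper bound on the iteration count: hi - lo strictly shrinks each pass);
-- mid is always in range, so getD's default is never read
def bsGo (srow : List Int) (t : Int) : Nat → Nat → Nat → Nat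
  | 0, lo, _ => lo
  | fuel + 1, lo, hi =>
    if lo < hi then
      let mid := (lo + hi) / 2
      if srow.getD mid 0 < t then bsGo srow t fuel (mid + 1) hi
      else bsGo srow t fuel lo mid
    else lo

def bsLoop (srow : List Int) (t : Int) (lo hi : Nat) : Nat :=
  bsGo srow t (hi - lo) lo hi

def yoga_alt (classroom : List (List Int)) (poses : List Int) : Int :=
  classroom.foldl (fun amount row =>
    let s := row.sum
    let srow := PySem.List.sorted row (fun x => x)
    let n := srow.length
    poses.foldl (fun amount pose =>
      amount + ((n : Int) - (bsLoop srow (pose - s) 0 n : Int))) amount) 0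

-- ===== PRECONDITION & SPEC =====
def Spec_yoga (classroom : List (List Int)) (poses : List Int) (out : Int) : Prop := out = yoga_alt classroom poses
instance (classroom : List (List Int)) (poses : List Int) (out : Int) : Decidable (Spec_yoga classroom poses out) := by unfold Spec_yoga; infer_instance

-- ===== CLAIM (what is proved, stated in full; the proofs are below) =====
def Claim_equal_yoga : Prop := ∀ (classroom : List (List Int)) (poses : List Int), Dom_yoga classroom poses → Spec_yoga classroom poses (yoga classroom poses)

-- ===== LEMMAS AND PROOFS =====

-- the binary search returns the first index whose element is ≥ t (invariant proof over the loop)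
theorem bsLoop_spec (srow : List Int) (t : Int) (lo hi : Nat)
    (hs : srow.Pairwise (· ≤ ·)) (hlo : lo ≤ hi) (hhi : hi ≤ srow.length)
    (hL : ∀ j (_ : j < srow.length), j < lo → srow[j] < t)
    (hR : ∀ j (_ : j < srow.length), hi ≤ j → t ≤ srow[j]) :
    bsLoop srow t lo hi ≤ srow.length ∧
      (∀ j (_ : j < srow.length), j < bsLoop srow t lo hi → srow[j] < t) ∧
      (∀ j (_ : j < srow.length), bsLoop srow t lo hi ≤ j → t ≤ srow[j]) := by
  rw [List.pairwise_iff_getElem] at hs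
  rw [bsLoop]
  have main : ∀ (fuel lo hi : Nat), hi - lo ≤ fuel → lo ≤ hi → hi ≤ srow.length →
      (∀ j (_ : j < srow.length), j < lo → srow[j] < t) →
      (∀ j (_ : j < srow.length), hi ≤ j → t ≤ srow[j]) →
      bsGo srow t fuel lo hi ≤ srow.length ∧
        (∀ j (_ : j < srow.length), j < bsGo srow t fuel lo hi → srow[j] < t) ∧
        (∀ j (_ : j < srow.length), bsGo srow t fuel lo hi ≤ j → t ≤ srow[j]) := by
    intro fuel
    induction fuel with
    | zero =>
      intro lo hi hf hlo hhi hL hR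
      simp only [bsGo]
      have hlohi : lo = hi := by omega
      exact ⟨by omega, fun j hj hjlt => hL j hj hjlt,
        fun j hj hjge => hR j hj (by omega)⟩
    | succ fuel IH =>
      intro lo hi hf hlo hhi hL hR
      rw [bsGo]
      by_cases h : lo < hi
      · simp only [if_pos h]
        have hmid : (lo + hi) / 2 < srow.length := by omega
        rw [List.getD_eq_getElem srow 0 hmid]
        by_cases hc : srow[(lo + hi) / 2] < t
        · simp only [if_pos hc]
          exact IH ((lo + hi) / 2 + 1) hi (by omega) (by omega) hhi
            (fun j hj hjlt => by
              rcases Nat.lt_or_ge j ((lo + hi) / 2) with h1 | h1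
              · exact lt_of_le_of_lt (hs j ((lo + hi) / 2) hj hmid h1) hc
              · have : j = (lo + hi) / 2 := by omega
                simpa [this] using hc)
            hR
        · simp only [if_neg hc]
          push Not at hc
          exact IH lo ((lo + hi) / 2) (by omega) (by omega) (by omega) hL
            (fun j hj hjge => by
              rcases Nat.lt_or_ge ((lo + hi) / 2) j with h1 | h1
              · exact le_trans hc (hs ((lo + hi) / 2) j hmid hj h1)
              · have : j = (lo + hi) / 2 := by omega
                simpa [this] using hc)
      · simp only [if_neg h]
        have hlohi : lo = hi := by omega
        exact ⟨by omega, fun j hj hjlt => hL j hj hjlt,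
          fun j hj hjge => hR j hj (by omega)⟩
  exact main (hi - lo) lo hi (le_refl _) hlo hhi hL hR

theorem countP_of_split (xs : List Int) (t : Int) (k : Nat) (hk : k ≤ xs.length)
    (hL : ∀ j (_ : j < xs.length), j < k → xs[j] < t)
    (hR : ∀ j (_ : j < xs.length), k ≤ j → t ≤ xs[j]) :
    xs.countP (fun x => decide (t ≤ x)) = xs.length - k := by
  conv_lhs => rw [← List.take_append_drop k xs]
  rw [List.countP_append]
  have h1 : (xs.take k).countP (fun x => decide (t ≤ x)) = 0 := by
    rw [List.countP_eq_zero]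
    intro a ha
    rcases List.mem_iff_getElem.mp ha with ⟨i, hi, rfl⟩
    have hil : i < xs.length := lt_of_lt_of_le (lt_of_lt_of_le hi (by simp)) (le_refl _)
    rw [List.getElem_take]
    have hik : i < k := by simpa using lt_of_lt_of_le hi (by simp [List.length_take])
    simpa using not_le.mpr (hL i (by omega) hik)
  have h2 : (xs.drop k).countP (fun x => decide (t ≤ x)) = (xs.drop k).length := by
    rw [List.countP_eq_length]
    intro a ha
    rcases List.mem_iff_getElem.mp ha with ⟨i, hi, rfl⟩
    rw [List.getElem_drop]
    have : (xs.drop k).length = xs.length - k := by simp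
    exact decide_eq_true (hR (k + i) (by omega) (by omega))
  rw [h1, h2]
  simp

theorem row_step (row : List Int) (pose amount : Int) :
    row.foldl (fun amount per => if per + row.sum ≥ pose then amount + 1 else amount) amount
      = amount + (((PySem.List.sorted row (fun x => x)).length : Int)
          - (bsLoop (PySem.List.sorted row (fun x => x)) (pose - row.sum) 0
              (PySem.List.sorted row (fun x => x)).length : Int)) := by
  set srow := PySem.List.sorted row (fun x => x) with hsrow
  have hsort : srow.Pairwise (· ≤ ·) := by
    simpa using PySem.List.sorted_pairwise row (fun x => x)
  obtain ⟨hk, hbL, hbR⟩ := bsLoop_spec srow (pose - row.sum) 0 srow.length hsort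
    (Nat.zero_le _) (le_refl _) (fun j hj hjlt => by omega)
    (fun j hj hjge => by omega)
  have hcount : srow.countP (fun x => decide (pose - row.sum ≤ x))
      = srow.length - bsLoop srow (pose - row.sum) 0 srow.length :=
    countP_of_split srow (pose - row.sum) _ hk hbL hbR
  rw [PySem.List.foldl_ite_add_one (fun per => per + row.sum ≥ pose) row amount]
  have hperm : row.Perm srow := (PySem.List.sorted_perm row (fun x => x) false).symm
  have hcongr : row.countP (fun x => decide (x + row.sum ≥ pose))
      = srow.countP (fun x => decide (pose - row.sum ≤ x)) := by
    rw [hperm.countP_eq]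
    exact List.countP_congr (fun x _ => by constructor <;> (intro h; simp at h ⊢; omega))
  rw [hcongr, hcount]
  have : (bsLoop srow (pose - row.sum) 0 srow.length : Int) ≤ (srow.length : Int) := by
    exact_mod_cast hk
  push_cast [Nat.cast_sub hk]
  ring

theorem yoga_alt_nil_poses (classroom : List (List Int)) : yoga_alt classroom [] = 0 := by
  unfold yoga_alt
  induction classroom with
  | nil => rfl
  | cons r rs ih => simp only [List.foldl_nil] at ih ⊢; exact ih

-- ===== VERDICT (by name: the statement is the Claim_ definition above) =====
theorem yoga_spec : Claim_equal_yoga := by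
  intro classroom poses _dom
  unfold Spec_yoga yoga
  by_cases h : classroom.length = 0 ∨ poses.length = 0
  · rw [if_pos h]
    rcases h with h | h
    · rw [List.length_eq_zero_iff.mp h]; rfl
    · rw [List.length_eq_zero_iff.mp h, yoga_alt_nil_poses]
  · rw [if_neg h]
    unfold yoga_alt
    congr 1
    funext amount row
    simp only []
    have : ∀ a, poses.foldl (fun a pose =>
        row.foldl (fun a per => if per + row.sum ≥ pose then a + 1 else a) a) a
        = poses.foldl (fun a pose =>
            a + (((PySem.List.sorted row (fun x => x)).length : Int)
              - (bsLoop (PySem.List.sorted row (fun x => x)) (pose - row.sum) 0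
                  (PySem.List.sorted row (fun x => x)).length : Int))) a := by
      intro a
      have hf : (fun (a : Int) pose =>
          row.foldl (fun a per => if per + row.sum ≥ pose then a + 1 else a) a)
          = (fun (a : Int) pose =>
            a + (((PySem.List.sorted row (fun x => x)).length : Int)
              - (bsLoop (PySem.List.sorted row (fun x => x)) (pose - row.sum) 0
                  (PySem.List.sorted row (fun x => x)).length : Int))) := by
        funext b x
        exact row_step row x b
      rw [hf]
    exact this amount
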